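-- pv_equiv track=rewrite | github.com/yohan278/KITE-Kernel-Intelligence | external/ipw_internal/intelligence-per-watt/grid_eval/tool_agent.py | _build_selection_guide
-- ===== SOURCE A (Python) =====
-- from typing import Any, Dict, List, Optional, Tuple
--
-- def _build_selection_guide(available_tools: List[str]) -> str:
--     """Build tool selection guide based on available tools."""
--     lines = ["Choose tools based on task type:\n"]
--
--     # MATH section
--     math_tools = []
--     if "calculator" in available_tools:
--         math_tools.append("- Simple arithmetic/algebra -> calculator (instant, accurate)")
--     if "code_interpreter" in available_tools:
--         math_tools.append("- Numerical algorithms -> code_interpreter (programmable)")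
--     if math_tools:
--         lines.append("MATH PROBLEMS:")
--         lines.extend(math_tools)
--         lines.append("")
--
--     # CODING section
--     code_tools = []
--     if "code_interpreter" in available_tools:
--         code_tools.append("- Write/run code -> code_interpreter")
--     if code_tools:
--         lines.append("CODING TASKS:")
--         lines.extend(code_tools)
--         lines.append("")
--
--     # REASONING section
--     reasoning_tools = []
--     if "think" in available_tools:
--         reasoning_tools.append("- Step-by-step analysis -> think (organize thoughts first)")
--     # Cloud LLMs for complex reasoning
--     cloud = [t for t in available_tools if ":" in t]
--     if cloud:
--         reasoning_tools.append(f"- Complex reasoning -> {cloud[0]}")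
--     if reasoning_tools:
--         lines.append("REASONING/LOGIC:")
--         lines.extend(reasoning_tools)
--         lines.append("")
--
--     # FACTUAL section
--     factual_tools = []
--     if "web_search" in available_tools:
--         factual_tools.append("- Current events, recent facts -> web_search")
--     if factual_tools:
--         lines.append("FACTUAL/KNOWLEDGE:")
--         lines.extend(factual_tools)
--         lines.append("")
--
--     return "\n".join(lines)
-- ===== SOURCE B (Python) =====
-- # Single-pass, rule-driven rewrite: instead of testing fixed tool names against the
-- # list (four scans + a filter), scan the tool list ONCE; each tool fires the
-- # (section, slot, text) rules it enables (the first ':' tool fires the cloud slot),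
-- # collected in a slot-keyed dict; then emit the guide directly as one string.
--
-- _RULES = {
--     "calculator": [(0, 0, "- Simple arithmetic/algebra -> calculator (instant, accurate)")],
--     "code_interpreter": [(0, 1, "- Numerical algorithms -> code_interpreter (programmable)"),
--                          (1, 0, "- Write/run code -> code_interpreter")],
--     "think": [(2, 0, "- Step-by-step analysis -> think (organize thoughts first)")],
--     "web_search": [(3, 0, "- Current events, recent facts -> web_search")],
-- }
-- _HEADERS = ["MATH PROBLEMS:", "CODING TASKS:", "REASONING/LOGIC:", "FACTUAL/KNOWLEDGE:"]
--
--
-- def _build_selection_guide(available_tools):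
--     """Build tool selection guide based on available tools."""
--     fired = {}
--     cloud_found = False
--     for t in available_tools:
--         for i, j, text in _RULES.get(t, ()):
--             fired[(i, j)] = text
--         if not cloud_found and ":" in t:
--             fired[(2, 1)] = "- Complex reasoning -> " + t
--             cloud_found = True
--     out = "Choose tools based on task type:\n"
--     for i, header in enumerate(_HEADERS):
--         entries = [fired[(i, j)] for j in range(2) if (i, j) in fired]
--         if entries:
--             out += "\n" + header
--             for e in entries:
--                 out += "\n" + e
--             out += "\n"
--     return out
-- ===== Notes on version B (the rewrite author's own statement) =====
-- stated objective: alternative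
-- what changed: Inverts the traversal: instead of A's per-section membership scans of the tool list plus a filter for cloud tools, B scans the tool list once, each tool firing (section,slot,text) rules from a rule dictionary into a slot-keyed dict (the first ':' tool firing the cloud slot), then emits the guide directly by string concatenation instead of a lines list joined at the end.
import Mathlib
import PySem

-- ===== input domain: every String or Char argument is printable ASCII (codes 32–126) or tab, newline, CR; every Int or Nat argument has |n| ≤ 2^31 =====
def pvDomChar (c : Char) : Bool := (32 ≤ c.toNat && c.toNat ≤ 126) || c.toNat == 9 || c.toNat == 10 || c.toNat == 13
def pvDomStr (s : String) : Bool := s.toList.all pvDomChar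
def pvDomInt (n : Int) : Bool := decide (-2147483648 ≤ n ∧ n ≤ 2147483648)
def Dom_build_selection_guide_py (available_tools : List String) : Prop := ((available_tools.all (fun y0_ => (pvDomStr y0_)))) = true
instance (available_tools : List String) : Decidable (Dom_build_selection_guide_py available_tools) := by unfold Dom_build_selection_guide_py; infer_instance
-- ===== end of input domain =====

-- B inverts the traversal: one pass over the tool list firing (section,slot,text) rules
-- from a rule dictionary into a slot-keyed dict, then direct string emission (objective:
-- alternative decomposition, same cost).

-- ===== PORT A =====
-- literal transliteration of _build_selection_guide: each section's entry list is built by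
-- the same membership tests in the same order, appended to `lines` when nonempty,
-- and finally "\n".join(lines) = PySem.Str.join "\n" lines.
def build_selection_guide_py (available_tools : List String) : String :=
  let lines : List String := ["Choose tools based on task type:\n"]
  let math_tools : List String :=
    (if available_tools.contains "calculator" then
      ["- Simple arithmetic/algebra -> calculator (instant, accurate)"] else []) ++
    (if available_tools.contains "code_interpreter" then
      ["- Numerical algorithms -> code_interpreter (programmable)"] else [])
  let lines := if math_tools ≠ [] then lines ++ ["MATH PROBLEMS:"] ++ math_tools ++ [""] else lines
  let code_tools : List String :=
    (if available_tools.contains "code_interpreter" then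
      ["- Write/run code -> code_interpreter"] else [])
  let lines := if code_tools ≠ [] then lines ++ ["CODING TASKS:"] ++ code_tools ++ [""] else lines
  let reasoning_tools : List String :=
    (if available_tools.contains "think" then
      ["- Step-by-step analysis -> think (organize thoughts first)"] else [])
  let cloud : List String := available_tools.filter (fun t => PySem.Str.isIn ":" t)
  let reasoning_tools := reasoning_tools ++
    (match cloud with
     | c :: _ => ["- Complex reasoning -> " ++ c]
     | [] => [])
  let lines := if reasoning_tools ≠ [] then lines ++ ["REASONING/LOGIC:"] ++ reasoning_tools ++ [""] else lines
  let factual_tools : List String :=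
    (if available_tools.contains "web_search" then
      ["- Current events, recent facts -> web_search"] else [])
  let lines := if factual_tools ≠ [] then lines ++ ["FACTUAL/KNOWLEDGE:"] ++ factual_tools ++ [""] else lines
  PySem.Str.join "\n" lines

-- ===== PORT B =====
-- transliteration of Source B: the module-level rule dict _RULES and header list _HEADERS,
-- one fold over available_tools firing rules into the slot-keyed dict `fired`
-- (plus the cloud flag), then direct string concatenation over enumerate(_HEADERS).
def bsRulesDict : PySem.Dict String (List (Int × Int × String)) :=
  PySem.Dict.ofList
    [("calculator", [(0, 0, "- Simple arithmetic/algebra -> calculator (instant, accurate)")]),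
     ("code_interpreter", [(0, 1, "- Numerical algorithms -> code_interpreter (programmable)"),
                           (1, 0, "- Write/run code -> code_interpreter")]),
     ("think", [(2, 0, "- Step-by-step analysis -> think (organize thoughts first)")]),
     ("web_search", [(3, 0, "- Current events, recent facts -> web_search")])]

def bsHeaders : List String := ["MATH PROBLEMS:", "CODING TASKS:", "REASONING/LOGIC:", "FACTUAL/KNOWLEDGE:"]

def bsStep (s : PySem.Dict (Int × Int) String × Bool) (t : String) :
    PySem.Dict (Int × Int) String × Bool :=
  let d := ((bsRulesDict.get? t).getD []).foldl (fun d r => d.insert (r.1, r.2.1) r.2.2) s.1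
  if !s.2 && PySem.Str.isIn ":" t then
    (d.insert (2, 1) ("- Complex reasoning -> " ++ t), true)
  else (d, s.2)

def build_selection_guide_py_alt (available_tools : List String) : String :=
  let fired := (available_tools.foldl bsStep (PySem.Dict.empty, false)).1
  (PySem.List.enumerate bsHeaders).foldl
    (fun out p =>
      let entries := (PySem.List.pyRange 0 2 1).filterMap (fun j => fired.get? (p.1, j))
      if entries ≠ [] then
        (entries.foldl (fun o e => o ++ ("\n" ++ e)) (out ++ ("\n" ++ p.2))) ++ "\n"
      else out)
    "Choose tools based on task type:\n"

-- ===== PRECONDITION & SPEC =====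
def Spec_build_selection_guide_py (available_tools : List String) (out : String) : Prop := out = build_selection_guide_py_alt available_tools
instance (available_tools : List String) (out : String) : Decidable (Spec_build_selection_guide_py available_tools out) := by unfold Spec_build_selection_guide_py; infer_instance

-- ===== CLAIM (what is proved, stated in full; the proofs are below) =====
def Claim_equal_build_selection_guide_py : Prop := ∀ (available_tools : List String), Dom_build_selection_guide_py available_tools → Spec_build_selection_guide_py available_tools (build_selection_guide_py available_tools)

-- ===== LEMMAS AND PROOFS =====

-- the rule dict as a literal (ofList over distinct keys)
theorem bs_rules_eq : bsRulesDict = PySem.Dict.mk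
    [("calculator", [(0, 0, "- Simple arithmetic/algebra -> calculator (instant, accurate)")]),
     ("code_interpreter", [(0, 1, "- Numerical algorithms -> code_interpreter (programmable)"),
                           (1, 0, "- Write/run code -> code_interpreter")]),
     ("think", [(2, 0, "- Step-by-step analysis -> think (organize thoughts first)")]),
     ("web_search", [(3, 0, "- Current events, recent facts -> web_search")])] := by decide

-- evaluating the rule lookup on an arbitrary tool name
theorem bs_get?_rules (t : String) : bsRulesDict.get? t =
    if "calculator" = t then some [(0, 0, "- Simple arithmetic/algebra -> calculator (instant, accurate)")]
    else if "code_interpreter" = t then some [(0, 1, "- Numerical algorithms -> code_interpreter (programmable)"),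
                                              (1, 0, "- Write/run code -> code_interpreter")]
    else if "think" = t then some [(2, 0, "- Step-by-step analysis -> think (organize thoughts first)")]
    else if "web_search" = t then some [(3, 0, "- Current events, recent facts -> web_search")]
    else none := by
  simp only [bs_rules_eq, PySem.Dict.get?_mk_cons]
  by_cases h1 : "calculator" = t
  · rw [← h1]; simp [PySem.Dict.get?]
  by_cases h2 : "code_interpreter" = t
  · rw [← h2]; simp [PySem.Dict.get?]
  by_cases h3 : "think" = t
  · rw [← h3]; simp [PySem.Dict.get?]
  by_cases h4 : "web_search" = t
  · rw [← h4]; simp [PySem.Dict.get?]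
  simp [h1, h2, h3, h4, beq_iff_eq, PySem.Dict.get?]

theorem bs_step_00 (s : PySem.Dict (Int × Int) String × Bool) (t : String) :
    ((bsStep s t).1.get? (0, 0)) = if "calculator" = t then some "- Simple arithmetic/algebra -> calculator (instant, accurate)" else s.1.get? (0, 0) := by
  simp only [bsStep, bs_get?_rules]
  by_cases h1 : "calculator" = t
  · rw [← h1]
    simp [(by decide : PySem.Chars.isIn [':'] ['c', 'a', 'l', 'c', 'u', 'l', 'a', 't', 'o', 'r'] = false), PySem.Dict.get?_insert]
  by_cases h2 : "code_interpreter" = t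
  · rw [← h2]
    simp [(by decide : PySem.Chars.isIn [':'] ['c', 'o', 'd', 'e', '_', 'i', 'n', 't', 'e', 'r', 'p', 'r', 'e', 't', 'e', 'r'] = false), PySem.Dict.get?_insert]
  by_cases h3 : "think" = t
  · rw [← h3]
    simp [(by decide : PySem.Chars.isIn [':'] ['t', 'h', 'i', 'n', 'k'] = false), PySem.Dict.get?_insert]
  by_cases h4 : "web_search" = t
  · rw [← h4]
    simp [(by decide : PySem.Chars.isIn [':'] ['w', 'e', 'b', '_', 's', 'e', 'a', 'r', 'c', 'h'] = false), PySem.Dict.get?_insert]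
  simp only [if_neg h1, if_neg h2, if_neg h3, if_neg h4, if_neg h1, Option.getD_none, List.foldl_nil]
  split_ifs <;> simp [PySem.Dict.get?_insert]

theorem bs_step_01 (s : PySem.Dict (Int × Int) String × Bool) (t : String) :
    ((bsStep s t).1.get? (0, 1)) = if "code_interpreter" = t then some "- Numerical algorithms -> code_interpreter (programmable)" else s.1.get? (0, 1) := by
  simp only [bsStep, bs_get?_rules]
  by_cases h1 : "calculator" = t
  · rw [← h1]
    simp [(by decide : PySem.Chars.isIn [':'] ['c', 'a', 'l', 'c', 'u', 'l', 'a', 't', 'o', 'r'] = false), PySem.Dict.get?_insert]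
  by_cases h2 : "code_interpreter" = t
  · rw [← h2]
    simp [(by decide : PySem.Chars.isIn [':'] ['c', 'o', 'd', 'e', '_', 'i', 'n', 't', 'e', 'r', 'p', 'r', 'e', 't', 'e', 'r'] = false), PySem.Dict.get?_insert]
  by_cases h3 : "think" = t
  · rw [← h3]
    simp [(by decide : PySem.Chars.isIn [':'] ['t', 'h', 'i', 'n', 'k'] = false), PySem.Dict.get?_insert]
  by_cases h4 : "web_search" = t
  · rw [← h4]
    simp [(by decide : PySem.Chars.isIn [':'] ['w', 'e', 'b', '_', 's', 'e', 'a', 'r', 'c', 'h'] = false), PySem.Dict.get?_insert]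
  simp only [if_neg h1, if_neg h2, if_neg h3, if_neg h4, if_neg h2, Option.getD_none, List.foldl_nil]
  split_ifs <;> simp [PySem.Dict.get?_insert]

theorem bs_step_10 (s : PySem.Dict (Int × Int) String × Bool) (t : String) :
    ((bsStep s t).1.get? (1, 0)) = if "code_interpreter" = t then some "- Write/run code -> code_interpreter" else s.1.get? (1, 0) := by
  simp only [bsStep, bs_get?_rules]
  by_cases h1 : "calculator" = t
  · rw [← h1]
    simp [(by decide : PySem.Chars.isIn [':'] ['c', 'a', 'l', 'c', 'u', 'l', 'a', 't', 'o', 'r'] = false), PySem.Dict.get?_insert]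
  by_cases h2 : "code_interpreter" = t
  · rw [← h2]
    simp [(by decide : PySem.Chars.isIn [':'] ['c', 'o', 'd', 'e', '_', 'i', 'n', 't', 'e', 'r', 'p', 'r', 'e', 't', 'e', 'r'] = false), PySem.Dict.get?_insert]
  by_cases h3 : "think" = t
  · rw [← h3]
    simp [(by decide : PySem.Chars.isIn [':'] ['t', 'h', 'i', 'n', 'k'] = false), PySem.Dict.get?_insert]
  by_cases h4 : "web_search" = t
  · rw [← h4]
    simp [(by decide : PySem.Chars.isIn [':'] ['w', 'e', 'b', '_', 's', 'e', 'a', 'r', 'c', 'h'] = false), PySem.Dict.get?_insert]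
  simp only [if_neg h1, if_neg h2, if_neg h3, if_neg h4, if_neg h2, Option.getD_none, List.foldl_nil]
  split_ifs <;> simp [PySem.Dict.get?_insert]

theorem bs_step_20 (s : PySem.Dict (Int × Int) String × Bool) (t : String) :
    ((bsStep s t).1.get? (2, 0)) = if "think" = t then some "- Step-by-step analysis -> think (organize thoughts first)" else s.1.get? (2, 0) := by
  simp only [bsStep, bs_get?_rules]
  by_cases h1 : "calculator" = t
  · rw [← h1]
    simp [(by decide : PySem.Chars.isIn [':'] ['c', 'a', 'l', 'c', 'u', 'l', 'a', 't', 'o', 'r'] = false), PySem.Dict.get?_insert]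
  by_cases h2 : "code_interpreter" = t
  · rw [← h2]
    simp [(by decide : PySem.Chars.isIn [':'] ['c', 'o', 'd', 'e', '_', 'i', 'n', 't', 'e', 'r', 'p', 'r', 'e', 't', 'e', 'r'] = false), PySem.Dict.get?_insert]
  by_cases h3 : "think" = t
  · rw [← h3]
    simp [(by decide : PySem.Chars.isIn [':'] ['t', 'h', 'i', 'n', 'k'] = false), PySem.Dict.get?_insert]
  by_cases h4 : "web_search" = t
  · rw [← h4]
    simp [(by decide : PySem.Chars.isIn [':'] ['w', 'e', 'b', '_', 's', 'e', 'a', 'r', 'c', 'h'] = false), PySem.Dict.get?_insert]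
  simp only [if_neg h1, if_neg h2, if_neg h3, if_neg h4, if_neg h3, Option.getD_none, List.foldl_nil]
  split_ifs <;> simp [PySem.Dict.get?_insert]

theorem bs_step_30 (s : PySem.Dict (Int × Int) String × Bool) (t : String) :
    ((bsStep s t).1.get? (3, 0)) = if "web_search" = t then some "- Current events, recent facts -> web_search" else s.1.get? (3, 0) := by
  simp only [bsStep, bs_get?_rules]
  by_cases h1 : "calculator" = t
  · rw [← h1]
    simp [(by decide : PySem.Chars.isIn [':'] ['c', 'a', 'l', 'c', 'u', 'l', 'a', 't', 'o', 'r'] = false), PySem.Dict.get?_insert]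
  by_cases h2 : "code_interpreter" = t
  · rw [← h2]
    simp [(by decide : PySem.Chars.isIn [':'] ['c', 'o', 'd', 'e', '_', 'i', 'n', 't', 'e', 'r', 'p', 'r', 'e', 't', 'e', 'r'] = false), PySem.Dict.get?_insert]
  by_cases h3 : "think" = t
  · rw [← h3]
    simp [(by decide : PySem.Chars.isIn [':'] ['t', 'h', 'i', 'n', 'k'] = false), PySem.Dict.get?_insert]
  by_cases h4 : "web_search" = t
  · rw [← h4]
    simp [(by decide : PySem.Chars.isIn [':'] ['w', 'e', 'b', '_', 's', 'e', 'a', 'r', 'c', 'h'] = false), PySem.Dict.get?_insert]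
  simp only [if_neg h1, if_neg h2, if_neg h3, if_neg h4, if_neg h4, Option.getD_none, List.foldl_nil]
  split_ifs <;> simp [PySem.Dict.get?_insert]

theorem bs_step_21 (s : PySem.Dict (Int × Int) String × Bool) (t : String) :
    ((bsStep s t).1.get? (2, 1)) = if !s.2 && PySem.Str.isIn ":" t
      then some ("- Complex reasoning -> " ++ t) else s.1.get? (2, 1) := by
  simp only [bsStep, bs_get?_rules]
  by_cases h1 : "calculator" = t
  · rw [← h1]
    simp [(by decide : PySem.Chars.isIn [':'] ['c', 'a', 'l', 'c', 'u', 'l', 'a', 't', 'o', 'r'] = false), PySem.Dict.get?_insert]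
  by_cases h2 : "code_interpreter" = t
  · rw [← h2]
    simp [(by decide : PySem.Chars.isIn [':'] ['c', 'o', 'd', 'e', '_', 'i', 'n', 't', 'e', 'r', 'p', 'r', 'e', 't', 'e', 'r'] = false), PySem.Dict.get?_insert]
  by_cases h3 : "think" = t
  · rw [← h3]
    simp [(by decide : PySem.Chars.isIn [':'] ['t', 'h', 'i', 'n', 'k'] = false), PySem.Dict.get?_insert]
  by_cases h4 : "web_search" = t
  · rw [← h4]
    simp [(by decide : PySem.Chars.isIn [':'] ['w', 'e', 'b', '_', 's', 'e', 'a', 'r', 'c', 'h'] = false), PySem.Dict.get?_insert]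
  simp only [if_neg h1, if_neg h2, if_neg h3, if_neg h4, Option.getD_none, List.foldl_nil]
  split_ifs <;> simp [PySem.Dict.get?_insert]

-- slots (1,1) and (3,1) are never written
theorem bs_step_nowrite (s : PySem.Dict (Int × Int) String × Bool) (t : String)
    (K : Int × Int) (hK1 : K ≠ (0, 0)) (hK2 : K ≠ (0, 1)) (hK3 : K ≠ (1, 0))
    (hK4 : K ≠ (2, 0)) (hK5 : K ≠ (3, 0)) (hK6 : K ≠ (2, 1)) :
    ((bsStep s t).1.get? K) = s.1.get? K := by
  simp only [bsStep, bs_get?_rules]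
  by_cases h1 : "calculator" = t
  · rw [← h1]
    simp [(by decide : PySem.Chars.isIn [':'] ['c', 'a', 'l', 'c', 'u', 'l', 'a', 't', 'o', 'r'] = false), PySem.Dict.get?_insert, hK1, hK6]
  by_cases h2 : "code_interpreter" = t
  · rw [← h2]
    simp [(by decide : PySem.Chars.isIn [':'] ['c', 'o', 'd', 'e', '_', 'i', 'n', 't', 'e', 'r', 'p', 'r', 'e', 't', 'e', 'r'] = false), PySem.Dict.get?_insert, hK2, hK3, hK6]
  by_cases h3 : "think" = t
  · rw [← h3]
    simp [(by decide : PySem.Chars.isIn [':'] ['t', 'h', 'i', 'n', 'k'] = false), PySem.Dict.get?_insert, hK4, hK6]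
  by_cases h4 : "web_search" = t
  · rw [← h4]
    simp [(by decide : PySem.Chars.isIn [':'] ['w', 'e', 'b', '_', 's', 'e', 'a', 'r', 'c', 'h'] = false), PySem.Dict.get?_insert, hK5, hK6]
  simp only [if_neg h1, if_neg h2, if_neg h3, if_neg h4, Option.getD_none, List.foldl_nil]
  split_ifs <;> simp [PySem.Dict.get?_insert, hK6]

theorem bs_fold_nowrite (K : Int × Int) (hK1 : K ≠ (0, 0)) (hK2 : K ≠ (0, 1)) (hK3 : K ≠ (1, 0))
    (hK4 : K ≠ (2, 0)) (hK5 : K ≠ (3, 0)) (hK6 : K ≠ (2, 1))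
    (ts : List String) (d : PySem.Dict (Int × Int) String) (cf : Bool) :
    ((ts.foldl bsStep (d, cf)).1.get? K) = d.get? K := by
  induction ts generalizing d cf with
  | nil => simp
  | cons t ts ih =>
    simp only [List.foldl_cons]
    have hs : List.foldl bsStep (bsStep (d, cf) t) ts
        = List.foldl bsStep ((bsStep (d, cf) t).1, (bsStep (d, cf) t).2) ts := by simp
    rw [hs, ih, bs_step_nowrite _ _ _ hK1 hK2 hK3 hK4 hK5 hK6]

theorem bs_step_flag (s : PySem.Dict (Int × Int) String × Bool) (t : String) :
    (bsStep s t).2 = (s.2 || PySem.Str.isIn ":" t) := by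
  simp only [bsStep]
  cases hs : s.2 <;> cases hi : PySem.Str.isIn ":" t <;> simp_all

-- a fixed slot after the whole fold: set iff its tool occurs in ts
theorem bs_fold_fixed (K : Int × Int) (name text : String)
    (hstep : ∀ s t, ((bsStep s t).1.get? K) = if name = t then some text else s.1.get? K)
    (ts : List String) (d : PySem.Dict (Int × Int) String) (cf : Bool) :
    ((ts.foldl bsStep (d, cf)).1.get? K) =
      if ts.contains name then some text else d.get? K := by
  induction ts generalizing d cf with
  | nil => simp
  | cons t ts ih =>
    simp only [List.foldl_cons]
    have hs : List.foldl bsStep (bsStep (d, cf) t) ts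
        = List.foldl bsStep ((bsStep (d, cf) t).1, (bsStep (d, cf) t).2) ts := by simp
    rw [hs, ih, hstep]
    by_cases ht : name = t <;> by_cases hc : ts.contains name <;>
      simp_all [List.contains_cons, eq_comm]

-- the cloud slot after the fold: the first ':' tool
theorem bs_fold_cloud (ts : List String) (d : PySem.Dict (Int × Int) String) (cf : Bool) :
    ((ts.foldl bsStep (d, cf)).1.get? (2, 1)) =
      if cf then d.get? (2, 1) else
        (match ts.find? (fun t => PySem.Str.isIn ":" t) with
         | some c => some ("- Complex reasoning -> " ++ c)
         | none => d.get? (2, 1)) := by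
  induction ts generalizing d cf with
  | nil => simp
  | cons t ts ih =>
    simp only [List.foldl_cons]
    have hs : List.foldl bsStep (bsStep (d, cf) t) ts
        = List.foldl bsStep ((bsStep (d, cf) t).1, (bsStep (d, cf) t).2) ts := by simp
    rw [hs, ih, bs_step_flag, bs_step_21]
    cases hcf : cf <;> cases hp : PySem.Chars.isIn [':'] t.toList <;>
      simp [List.find?_cons, hp]

-- ===== VERDICT (by name: the statement is the Claim_ definition above) =====
set_option maxHeartbeats 2000000 in
set_option maxRecDepth 8192 in
theorem build_selection_guide_py_spec : Claim_equal_build_selection_guide_py := by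
  intro ts _
  unfold Spec_build_selection_guide_py build_selection_guide_py build_selection_guide_py_alt
  have h00 := bs_fold_fixed (0, 0) "calculator"
    "- Simple arithmetic/algebra -> calculator (instant, accurate)" bs_step_00 ts PySem.Dict.empty false
  have h01 := bs_fold_fixed (0, 1) "code_interpreter"
    "- Numerical algorithms -> code_interpreter (programmable)" bs_step_01 ts PySem.Dict.empty false
  have h10 := bs_fold_fixed (1, 0) "code_interpreter"
    "- Write/run code -> code_interpreter" bs_step_10 ts PySem.Dict.empty false
  have h20 := bs_fold_fixed (2, 0) "think"
    "- Step-by-step analysis -> think (organize thoughts first)" bs_step_20 ts PySem.Dict.empty false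
  have h30 := bs_fold_fixed (3, 0) "web_search"
    "- Current events, recent facts -> web_search" bs_step_30 ts PySem.Dict.empty false
  have h21 := bs_fold_cloud ts PySem.Dict.empty false
  have h11 := bs_fold_nowrite (1, 1) (by decide) (by decide) (by decide) (by decide) (by decide) (by decide) ts PySem.Dict.empty false
  have h31 := bs_fold_nowrite (3, 1) (by decide) (by decide) (by decide) (by decide) (by decide) (by decide) ts PySem.Dict.empty false
  have hfind : ts.find? (fun t => PySem.Str.isIn ":" t)
      = (ts.filter (fun t => PySem.Str.isIn ":" t)).head? := List.head?_filter.symm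
  cases c1 : ts.contains "calculator" <;>
  cases c2 : ts.contains "code_interpreter" <;>
  cases c3 : ts.contains "think" <;>
  cases c4 : ts.contains "web_search" <;>
  cases hc : ts.filter (fun t => PySem.Str.isIn ":" t) <;>
  · rw [hfind, hc] at h21
    rw [c1] at h00; rw [c2] at h01; rw [c2] at h10; rw [c3] at h20; rw [c4] at h30
    simp only [bsHeaders, PySem.List.enumerate, List.foldl,
      (by decide : PySem.List.pyRange 0 2 1 = [0, 1]), List.filterMap] at *
    simp [h00, h01, h10, h20, h30, h21, h11, h31]
    try rw [← String.toList_inj]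
    try simp only [PySem.Str.toList_join, List.map, String.toList_append, PySem.Chars.join]
    try simp [List.intercalate, List.intersperse]
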